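-- pv_equiv track=rewrite | github.com/Josh-Reimer/audiobug | audio-diarization/voicer.py | merge_sentence_segments
-- ===== SOURCE A (Python) =====
-- from typing import List, Tuple, Optional
--
-- def merge_sentence_segments(segments: List[dict], max_gap_ms: int = 300) -> List[dict]:
--     """
--     Merge segments that are close together (likely same sentence with brief pauses)
--     """
--     if not segments:
--         return []
--
--     max_gap_samples = int(max_gap_ms * 16000 / 1000)  # Convert to samples
--
--     merged_segments = []
--     current_segment = segments[0].copy()
--
--     for i in range(1, len(segments)):
--         current_end = current_segment['end']
--         next_start = segments[i]['start']
--         next_end = segments[i]['end']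
--
--         # If the gap is small, merge segments (brief pause within sentence)
--         if next_start - current_end <= max_gap_samples:
--             current_segment['end'] = next_end
--         else:
--             # Significant gap - treat as separate sentences
--             merged_segments.append(current_segment)
--             current_segment = segments[i].copy()
--
--     # Add the last segment
--     merged_segments.append(current_segment)
--
--     return merged_segments
-- ===== SOURCE B (Python) =====
-- from typing import List
--
-- def merge_sentence_segments(segments: List[dict], max_gap_ms: int = 300) -> List[dict]:
--     """Group-then-transform: split into runs at large gaps, then merge each run."""
--     if not segments:
--         return []
--     max_gap_samples = int(max_gap_ms * 16000 / 1000)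
--     # pass 1: partition segments into consecutive runs
--     runs = []
--     current = [segments[0]]
--     for prev, seg in zip(segments, segments[1:]):
--         if seg['start'] - prev['end'] <= max_gap_samples:
--             current.append(seg)
--         else:
--             runs.append(current)
--             current = [seg]
--     runs.append(current)
--     # pass 2: map each run to one merged segment
--     out = []
--     for run in runs:
--         d = run[0].copy()
--         if len(run) > 1:
--             d['end'] = run[-1]['end']
--         out.append(d)
--     return out
-- ===== Notes on version B (the rewrite author's own statement) =====
-- stated objective: alternative
-- what changed: Replaces the inline accumulate-and-copy loop (a mutable current dict updated in place) with a group-then-transform pipeline: one pass partitions segments into runs at gaps > threshold, a second pass maps each run to run[0].copy() with 'end' set to run[-1]['end'].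
import Mathlib
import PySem

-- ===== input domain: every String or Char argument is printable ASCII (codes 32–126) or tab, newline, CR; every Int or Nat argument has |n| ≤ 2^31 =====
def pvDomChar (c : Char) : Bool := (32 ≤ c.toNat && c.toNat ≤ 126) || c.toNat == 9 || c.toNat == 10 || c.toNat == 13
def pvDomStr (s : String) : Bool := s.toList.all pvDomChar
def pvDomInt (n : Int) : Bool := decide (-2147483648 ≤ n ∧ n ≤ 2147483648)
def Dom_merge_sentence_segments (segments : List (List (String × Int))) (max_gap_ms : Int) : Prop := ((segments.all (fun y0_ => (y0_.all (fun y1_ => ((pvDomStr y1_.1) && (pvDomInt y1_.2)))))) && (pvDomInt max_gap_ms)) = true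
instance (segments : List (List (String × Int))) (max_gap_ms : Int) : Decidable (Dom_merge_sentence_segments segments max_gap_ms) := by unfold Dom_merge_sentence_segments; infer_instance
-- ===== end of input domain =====

-- B replaces A's inline accumulate-and-mutate loop by a group-then-transform pipeline
-- (partition into runs at large gaps, then map each run to a merged dict); alternative, same cost.


-- ===== PORT A =====
-- int(max_gap_ms * 16000 / 1000): for |max_gap_ms| ≤ 2^31 the float computation is exact and
-- equals max_gap_ms * 16 (the product < 2^53 is exact and the true quotient is representable).
def mergeA_step (gap : Int) (st : List (List (String × Int)) × List (String × Int))
    (seg : List (String × Int)) : List (List (String × Int)) × List (String × Int) :=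
  let current_end := (PySem.Dict.mk st.2).getD "end" 0      -- key present by Pre_
  let next_start := (PySem.Dict.mk seg).getD "start" 0      -- key present by Pre_
  let next_end := (PySem.Dict.mk seg).getD "end" 0          -- key present by Pre_
  if next_start - current_end ≤ gap then
    (st.1, ((PySem.Dict.mk st.2).insert "end" next_end).items)
  else
    (st.1 ++ [st.2], seg)

def merge_sentence_segments (segments : List (List (String × Int))) (max_gap_ms : Int) : List (List (String × Int)) :=
  match segments with
  | [] => []
  | s0 :: rest =>
    let max_gap_samples := max_gap_ms * 16
    let st := rest.foldl (mergeA_step max_gap_samples) ([], s0)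
    st.1 ++ [st.2]

-- ===== PORT B =====
def mergeB_runStep (gap : Int) (st : List (List (List (String × Int))) × List (List (String × Int)))
    (pc : List (String × Int) × List (String × Int)) :
    List (List (List (String × Int))) × List (List (String × Int)) :=
  if (PySem.Dict.mk pc.2).getD "start" 0 - (PySem.Dict.mk pc.1).getD "end" 0 ≤ gap then
    (st.1, st.2 ++ [pc.2])
  else
    (st.1 ++ [st.2], [pc.2])

def mergeB_finish (run : List (List (String × Int))) : List (String × Int) :=
  if 1 < run.length then
    ((PySem.Dict.mk (run.headD [])).insert "end" ((PySem.Dict.mk (run.getLastD [])).getD "end" 0)).items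
  else run.headD []

def merge_sentence_segments_alt (segments : List (List (String × Int))) (max_gap_ms : Int) : List (List (String × Int)) :=
  match segments with
  | [] => []
  | s0 :: rest =>
    let max_gap_samples := max_gap_ms * 16
    let st := (segments.zip rest).foldl (mergeB_runStep max_gap_samples) ([], [s0])
    (st.1 ++ [st.2]).map mergeB_finish

-- ===== PRECONDITION & SPEC =====
-- Pre_ excludes exactly the inputs on which Python A raises KeyError: lists of length ≥ 2 in
-- which some segment lacks the 'end' key or some non-first segment lacks the 'start' key.
def Pre_merge_sentence_segments (segments : List (List (String × Int))) (max_gap_ms : Int) : Prop :=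
  segments.length ≤ 1 ∨
  ((segments.all (fun seg => (PySem.Dict.mk seg).contains "end")
    && segments.tail.all (fun seg => (PySem.Dict.mk seg).contains "start")) = true)
instance (segments : List (List (String × Int))) (max_gap_ms : Int) : Decidable (Pre_merge_sentence_segments segments max_gap_ms) := by unfold Pre_merge_sentence_segments; infer_instance

def pvWitness_merge_sentence_segments : (List (List (String × Int))) × Int :=
  ([[("start", 0), ("end", 100)], [("start", 200), ("end", 300)], [("start", 20000), ("end", 20500)]], 300)

def Spec_merge_sentence_segments (segments : List (List (String × Int))) (max_gap_ms : Int) (out : List (List (String × Int))) : Prop := out = merge_sentence_segments_alt segments max_gap_ms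
instance (segments : List (List (String × Int))) (max_gap_ms : Int) (out : List (List (String × Int))) : Decidable (Spec_merge_sentence_segments segments max_gap_ms out) := by unfold Spec_merge_sentence_segments; infer_instance

-- ===== CLAIM (what is proved, stated in full; the proofs are below) =====
def Claim_equal_merge_sentence_segments : Prop := ∀ (segments : List (List (String × Int))) (max_gap_ms : Int), Dom_merge_sentence_segments segments max_gap_ms → Pre_merge_sentence_segments segments max_gap_ms → Spec_merge_sentence_segments segments max_gap_ms (merge_sentence_segments segments max_gap_ms)

-- ===== LEMMAS AND PROOFS =====

theorem dict_mk_items (d : PySem.Dict String Int) : PySem.Dict.mk d.items = d := rfl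

-- overwriting the same key twice keeps only the second write
theorem dict_insert_insert_same (d : PySem.Dict String Int) (k : String) (v v' : Int) :
    (d.insert k v).insert k v' = d.insert k v' := by
  have hc : (d.insert k v).contains k = true := PySem.Dict.contains_insert_self d k v
  have hitems : ((d.insert k v).insert k v').items = (d.insert k v').items := by
    rw [PySem.Dict.items_insert_of_contains (d.insert k v) v' hc]
    by_cases h : d.contains k = true
    · rw [PySem.Dict.items_insert_of_contains d v h, PySem.Dict.items_insert_of_contains d v' h,
        List.map_map]
      refine List.map_congr_left ?_
      rintro ⟨pk, pv⟩ _
      by_cases hp : pk = k <;> simp [hp]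
    · have h' : d.contains k = false := by simpa using h
      rw [PySem.Dict.items_insert_of_not_contains d v h',
        PySem.Dict.items_insert_of_not_contains d v' h', List.map_append]
      have hall : ∀ p ∈ d.items, (p.1 == k) = false := by
        have hany : d.items.any (fun p => p.1 == k) = false := by
          simpa [PySem.Dict.contains] using h'
        intro p hp
        simpa using (List.any_eq_false.mp hany) p hp
      have hmap : d.items.map (fun p => if (p.1 == k) = true then (k, v') else p) = d.items := by
        refine (List.map_congr_left ?_).trans (List.map_id d.items)
        intro p hp
        simp [hall p hp]
      rw [hmap]
      simp
  calc (d.insert k v).insert k v'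
      = PySem.Dict.mk (((d.insert k v).insert k v').items) := rfl
    _ = PySem.Dict.mk ((d.insert k v').items) := by rw [hitems]
    _ = d.insert k v' := rfl

-- a multi-element run finishes to first-copy-with-last-end
theorem finish_cons_cons (h t0 : List (String × Int)) (ts : List (List (String × Int)))
    (prev : List (String × Int)) (hlast : (h :: t0 :: ts).getLast? = some prev) :
    mergeB_finish (h :: t0 :: ts)
      = ((PySem.Dict.mk h).insert "end" ((PySem.Dict.mk prev).getD "end" 0)).items := by
  simp [mergeB_finish, hlast]

-- main loop correspondence between A's accumulate-and-copy fold and B's run-building fold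
theorem loop_eq (gap : Int) :
    ∀ (rest : List (List (String × Int))) (prev h : List (String × Int))
      (t : List (List (String × Int))) (runs : List (List (List (String × Int)))),
      (h :: t).getLast? = some prev →
      rest.foldl (mergeA_step gap) (runs.map mergeB_finish, mergeB_finish (h :: t))
        = (let st := ((prev :: rest).zip rest).foldl (mergeB_runStep gap) (runs, h :: t)
           (st.1.map mergeB_finish, mergeB_finish st.2)) := by
  intro rest
  induction rest with
  | nil =>
    intro prev h t runs _
    simp [List.zip_nil_right]
  | cons seg rest ih =>
    intro prev h t runs hlast
    set e := (PySem.Dict.mk prev).getD "end" 0 with he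
    set ns := (PySem.Dict.mk seg).getD "start" 0 with hns
    set ne := (PySem.Dict.mk seg).getD "end" 0 with hne2
    have hlast2 : (h :: (t ++ [seg])).getLast? = some seg := by
      show ((h :: t) ++ [seg]).getLast? = some seg
      exact List.getLast?_concat
    have hcur : (PySem.Dict.mk (mergeB_finish (h :: t))).getD "end" 0 = e := by
      cases t with
      | nil =>
        have hph : h = prev := by simpa using hlast
        simp [mergeB_finish, hph, he]
      | cons t0 ts =>
        rw [finish_cons_cons h t0 ts prev hlast, dict_mk_items, PySem.Dict.getD_insert_self, he]
    have hmerge : ((PySem.Dict.mk (mergeB_finish (h :: t))).insert "end" ne).items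
        = mergeB_finish (h :: (t ++ [seg])) := by
      cases t with
      | nil =>
        have hone : mergeB_finish [h] = h := rfl
        rw [List.nil_append, finish_cons_cons h seg [] seg (by simp), hone, hne2]
      | cons t0 ts =>
        rw [finish_cons_cons h t0 ts prev hlast, dict_mk_items, dict_insert_insert_same,
          List.cons_append,
          finish_cons_cons h t0 (ts ++ [seg]) seg (by
            show ((h :: t0 :: ts) ++ [seg]).getLast? = some seg
            exact List.getLast?_concat), hne2]
    have hstepA : mergeA_step gap (runs.map mergeB_finish, mergeB_finish (h :: t)) seg
        = if ns - e ≤ gap then (runs.map mergeB_finish, mergeB_finish (h :: (t ++ [seg])))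
          else (runs.map mergeB_finish ++ [mergeB_finish (h :: t)], seg) := by
      simp only [mergeA_step, hcur, ← hns, ← hne2]
      by_cases hc : ns - e ≤ gap <;> simp [hc, hmerge]
    have hzip : (prev :: seg :: rest).zip (seg :: rest)
        = (prev, seg) :: ((seg :: rest).zip rest) := rfl
    have hstepB : mergeB_runStep gap (runs, h :: t) (prev, seg)
        = if ns - e ≤ gap then (runs, h :: (t ++ [seg])) else (runs ++ [h :: t], [seg]) := by
      simp only [mergeB_runStep, ← hns, ← he]
      by_cases hc : ns - e ≤ gap <;> simp [hc]
    rw [List.foldl_cons, hstepA, hzip, List.foldl_cons, hstepB]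
    by_cases hc : ns - e ≤ gap
    · rw [if_pos hc, if_pos hc]
      exact ih seg h (t ++ [seg]) runs hlast2
    · rw [if_neg hc, if_neg hc]
      have hstate : (runs.map mergeB_finish ++ [mergeB_finish (h :: t)], seg)
          = ((runs ++ [h :: t]).map mergeB_finish, mergeB_finish [seg]) := by
        rw [List.map_append]
        rfl
      rw [hstate]
      exact ih seg seg [] (runs ++ [h :: t]) (by simp)

-- ===== VERDICT (by name: the statement is the Claim_ definition above) =====
theorem merge_sentence_segments_spec : Claim_equal_merge_sentence_segments := by
  intro segments max_gap_ms _ _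
  unfold Spec_merge_sentence_segments
  match segments with
  | [] => rfl
  | s0 :: rest =>
    show (let st := rest.foldl (mergeA_step (max_gap_ms * 16)) ([], s0); st.1 ++ [st.2])
      = (let st := ((s0 :: rest).zip rest).foldl (mergeB_runStep (max_gap_ms * 16)) ([], [s0])
         (st.1 ++ [st.2]).map mergeB_finish)
    have hinit : (([] : List (List (String × Int))), s0)
        = ((([] : List (List (List (String × Int)))).map mergeB_finish), mergeB_finish [s0]) := rfl
    rw [hinit]
    rw [loop_eq (max_gap_ms * 16) rest s0 s0 [] [] (by simp)]
    simp
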